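-- pv_equiv track=rewrite | github.com/praneet195/MIT-6.00.2x | Problem Set 1-Greedy and Brute Force Algroithms/ps1.py | greedy_cow_transport
-- ===== SOURCE A (Python) =====
-- def greedy_cow_transport(cows,limit=10):
--     """
--     Uses a greedy heuristic to determine an allocation of cows that attempts to
--     minimize the number of spaceship trips needed to transport all the cows. The
--     returned allocation of cows may or may not be optimal.
--     The greedy heuristic should follow the following method:
--
--     1. As long as the current trip can fit another cow, add the largest cow that will fit
--         to the trip
--     2. Once the trip is full, begin a new trip to transport the remaining cows
--
--     Does not mutate the given dictionary of cows.
--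
--     Parameters:
--     cows - a dictionary of name (string), weight (int) pairs
--     limit - weight limit of the spaceship (an int)
--
--     Returns:
--     A list of lists, with each inner list containing the names of cows
--     transported on a particular trip and the overall list containing all the
--     trips
--     """
--     cowsrev=sorted(cows,key=cows.__getitem__,reverse=True)
--     newcows={}
--     for j in cowsrev:
--         if j in cows:
--             newcows[j]=cows[j]
--     tripsend=[]
--     while sum(newcows.values())!=0:
--         weight=0
--         j=[]
--         for i in newcows.keys():
--             if weight+newcows[i]<=limit and newcows[i]!=0:
--                 j.append(i)
--                 weight+=newcows[i]
--                 newcows[i]=0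
--         tripsend.append(j)
--     return tripsend
-- ===== SOURCE B (Python) =====
-- def greedy_cow_transport(cows, limit=10):
--     # Single pass, first-fit decreasing: place each cow (heaviest first) into
--     # the first open trip with enough remaining capacity, else open a new trip.
--     order = sorted(cows, key=cows.__getitem__, reverse=True)
--     trips = []  # each entry: [names, load]
--     for name in order:
--         w = cows[name]
--         if w == 0:
--             continue  # weightless cows need no transport
--         for trip in trips:
--             if trip[1] + w <= limit:
--                 trip[0].append(name)
--                 trip[1] += w
--                 break
--         else:
--             trips.append([[name], w])
--     return [trip[0] for trip in trips]
-- ===== Notes on version B (the rewrite author's own statement) =====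
-- stated objective: alternative
-- what changed: A repeatedly rescans the whole zero-marked cow dict once per trip (plus an O(n) dict-value sum per while iteration); B makes a single first-fit-decreasing pass that places each cow into the first open trip with room, so shipped cows are never revisited.
-- intended difference: On inputs with some nonzero weight whose weights sum to zero (only possible with negative weights), A returns [] with every cow left untransported because its 'while sum != 0' test reads total weight 0 as 'all shipped' ({'a': -5, 'b': 5} gives []), while B transports every nonzero-weight cow ([['b', 'a']]), which is the intended behaviour. — e.g. on greedy_cow_transport([("a", -5), ("b", 5)], 10): A returns [], B returns [["b", "a"]]
-- outside the precondition, e.g. on greedy_cow_transport({'a': 20}, 10): A does not finish within the time limit, B returns [['a']]; on greedy_cow_transport({'a': -5}, -3): A returns [['a']], B returns [['a']]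
import Mathlib
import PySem

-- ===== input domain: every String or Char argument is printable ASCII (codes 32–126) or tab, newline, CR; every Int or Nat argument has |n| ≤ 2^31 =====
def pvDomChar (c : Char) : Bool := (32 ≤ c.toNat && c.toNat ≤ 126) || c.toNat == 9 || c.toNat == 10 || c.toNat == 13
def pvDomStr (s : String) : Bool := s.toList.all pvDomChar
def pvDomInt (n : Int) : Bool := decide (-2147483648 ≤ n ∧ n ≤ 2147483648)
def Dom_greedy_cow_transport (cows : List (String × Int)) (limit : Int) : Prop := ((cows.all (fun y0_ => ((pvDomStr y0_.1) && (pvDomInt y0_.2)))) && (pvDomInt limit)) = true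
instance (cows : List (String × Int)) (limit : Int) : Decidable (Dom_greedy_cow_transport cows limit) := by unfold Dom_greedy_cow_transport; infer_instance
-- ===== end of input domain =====

-- B replaces A's per-trip rescans of a zero-marked dict (with a dict-value sum per
-- while iteration) by a single first-fit-decreasing pass over the sorted cows;
-- same greedy result, different loop structure (objective: alternative).


-- ===== PORT A =====
-- One iteration of A's inner 'for i in newcows.keys()' scan: state = ((trip names, trip weight), newcows).
def pvATripStep (limit : Int) (st : (List String × Int) × PySem.Dict String Int) (i : String) :
    (List String × Int) × PySem.Dict String Int :=
  if st.1.2 + st.2.getD i 0 ≤ limit ∧ st.2.getD i 0 ≠ 0 then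
    ((st.1.1 ++ [i], st.1.2 + st.2.getD i 0), st.2.insert i 0)
  else st

-- A's 'while sum(newcows.values()) != 0' loop; fuel is only a totality guard
-- (inside Pre_ each iteration zeroes at least one cow, so cows.length + 1 never runs out;
-- outside Pre_ the Python while loop can run forever).
def pvALoop (limit : Int) : Nat → PySem.Dict String Int → List (List String)
  | 0, _ => []
  | fuel+1, nc =>
    if nc.values.sum ≠ 0 then
      let r := nc.keys.foldl (pvATripStep limit) (([], 0), nc)
      r.1.1 :: pvALoop limit fuel r.2
    else []

def greedy_cow_transport (cows : List (String × Int)) (limit : Int) : List (List String) :=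
  let cowsD := PySem.Dict.ofList cows
  let cowsrev := PySem.List.sorted cowsD.keys (fun j => cowsD.getD j 0) true
  let newcows := cowsrev.foldl
    (fun nc j => if cowsD.contains j then nc.insert j (cowsD.getD j 0) else nc) PySem.Dict.empty
  pvALoop limit (cows.length + 1) newcows

-- ===== PORT B =====
-- Source B's inner 'for trip in trips: … break / else: append': put the cow in the
-- first open trip with room, else open a new trip at the end.
def pvBPlace (limit : Int) (name : String) (w : Int) :
    List (List String × Int) → List (List String × Int)
  | [] => [([name], w)]
  | t :: ts => if t.2 + w ≤ limit then (t.1 ++ [name], t.2 + w) :: ts else t :: pvBPlace limit name w ts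

def greedy_cow_transport_alt (cows : List (String × Int)) (limit : Int) : List (List String) :=
  let cowsD := PySem.Dict.ofList cows
  let order := PySem.List.sorted cowsD.keys (fun j => cowsD.getD j 0) true
  let trips := order.foldl
    (fun ts name => if cowsD.getD name 0 = 0 then ts else pvBPlace limit name (cowsD.getD name 0) ts) []
  trips.map (·.1)

-- ===== PRECONDITION & SPEC =====
-- Pre_ excludes weights above the limit and negative limits: there A's while loop never
-- terminates (except in the corner where every weight is at most a negative limit,
-- where A and B agree but A's termination argument degenerates).
def Pre_greedy_cow_transport (cows : List (String × Int)) (limit : Int) : Prop :=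
  0 ≤ limit ∧ ∀ p ∈ (PySem.Dict.ofList cows).items, p.2 ≤ limit
instance (cows : List (String × Int)) (limit : Int) : Decidable (Pre_greedy_cow_transport cows limit) := by
  unfold Pre_greedy_cow_transport; infer_instance

def pvWitness_greedy_cow_transport : (List (String × Int)) × Int := ([("a", 3), ("b", 5)], 10)

-- On inputs with some nonzero weight whose weights sum to zero (only possible with
-- negative weights), A returns [] with every cow left untransported — its 'while sum != 0'
-- test reads total weight 0 as 'all shipped' ({'a': -5, 'b': 5} gives []) — while B
-- transports every nonzero-weight cow ([['b', 'a']]), which is the intended behaviour.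
def D_greedy_cow_transport (cows : List (String × Int)) (limit : Int) : Prop :=
  (∃ p ∈ (PySem.Dict.ofList cows).items, p.2 ≠ 0) ∧
    ((PySem.Dict.ofList cows).items.map (·.2)).sum = 0
instance (cows : List (String × Int)) (limit : Int) : Decidable (D_greedy_cow_transport cows limit) := by
  unfold D_greedy_cow_transport; infer_instance

def Spec_greedy_cow_transport (cows : List (String × Int)) (limit : Int) (out : List (List String)) : Prop :=
  ¬ D_greedy_cow_transport cows limit → out = greedy_cow_transport_alt cows limit
instance (cows : List (String × Int)) (limit : Int) (out : List (List String)) : Decidable (Spec_greedy_cow_transport cows limit out) := by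
  unfold Spec_greedy_cow_transport; infer_instance

def pvDiffWitness_greedy_cow_transport : (List (String × Int)) × Int := ([("a", -5), ("b", 5)], 10)
def pvDiffWitnessOut_greedy_cow_transport : (List (List String)) × (List (List String)) := ([], [["b", "a"]])

-- ===== CLAIM (what is proved, stated in full; the proofs are below) =====
def Claim_unchanged_greedy_cow_transport : Prop := ∀ (cows : List (String × Int)) (limit : Int), Dom_greedy_cow_transport cows limit → Pre_greedy_cow_transport cows limit → Spec_greedy_cow_transport cows limit (greedy_cow_transport cows limit)
def Claim_changed_greedy_cow_transport : Prop := Dom_greedy_cow_transport (pvDiffWitness_greedy_cow_transport.1) (pvDiffWitness_greedy_cow_transport.2) ∧ Pre_greedy_cow_transport (pvDiffWitness_greedy_cow_transport.1) (pvDiffWitness_greedy_cow_transport.2) ∧ D_greedy_cow_transport (pvDiffWitness_greedy_cow_transport.1) (pvDiffWitness_greedy_cow_transport.2) ∧ greedy_cow_transport (pvDiffWitness_greedy_cow_transport.1) (pvDiffWitness_greedy_cow_transport.2) = pvDiffWitnessOut_greedy_cow_transport.1 ∧ greedy_cow_transport_alt (pvDiffWitness_greedy_cow_transport.1) (pvDiffWitness_greedy_cow_transport.2)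 = pvDiffWitnessOut_greedy_cow_transport.2 ∧ pvDiffWitnessOut_greedy_cow_transport.1 ≠ pvDiffWitnessOut_greedy_cow_transport.2

def Claim_exact_greedy_cow_transport : Prop := ∀ (cows : List (String × Int)) (limit : Int), Dom_greedy_cow_transport cows limit → Pre_greedy_cow_transport cows limit → D_greedy_cow_transport cows limit → greedy_cow_transport cows limit ≠ greedy_cow_transport_alt cows limit

-- ===== LEMMAS AND PROOFS =====

-- List model of A's trip scan on the dict's item list: shipped cows are marked weight 0.
def pvTrip (limit : Int) : List (String × Int) → Int → (List String × Int) × List (String × Int)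
  | [], w => (([], w), [])
  | (k, v) :: rest, w =>
    if w + v ≤ limit ∧ v ≠ 0 then
      let r := pvTrip limit rest (w + v)
      ((k :: r.1.1, r.1.2), (k, 0) :: r.2)
    else
      let r := pvTrip limit rest w
      (r.1, (k, v) :: r.2)

-- List model of A's while loop.
def pvMLoop (limit : Int) : Nat → List (String × Int) → List (List String)
  | 0, _ => []
  | fuel+1, L =>
    if (L.map (·.2)).sum ≠ 0 then
      let r := pvTrip limit L 0
      r.1.1 :: pvMLoop limit fuel r.2
    else []

-- Filling one trip greedily from a list of remaining cows (removing the cows taken).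
def pvFill (limit : Int) (t : List String × Int) : List (String × Int) → (List String × Int) × List (String × Int)
  | [] => (t, [])
  | (k, v) :: rest =>
    if t.2 + v ≤ limit then pvFill limit (t.1 ++ [k], t.2 + v) rest
    else
      let r := pvFill limit t rest
      (r.1, (k, v) :: r.2)

lemma pvMark_eq {k : String} (v : Int) : ∀ (l : List (String × Int)), (∀ p ∈ l, p.1 ≠ k) →
    l.map (fun p => if (p.1 == k) = true then (k, v) else p) = l := by
  intro l hl
  conv_rhs => rw [← List.map_id l]
  apply List.map_congr_left
  intro p hp
  simp [hl p hp]

-- A's inner scan over the dict's keys is pvTrip on its item list.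
lemma pvATrip_sim (limit : Int) : ∀ (L pre : List (String × Int)) (trip : List String) (weight : Int),
    ((pre ++ L).map (·.1)).Nodup →
    (L.map (·.1)).foldl (pvATripStep limit) ((trip, weight), PySem.Dict.mk (pre ++ L))
      = ((trip ++ (pvTrip limit L weight).1.1, (pvTrip limit L weight).1.2),
         PySem.Dict.mk (pre ++ (pvTrip limit L weight).2)) := by
  intro L
  induction L with
  | nil => intro pre trip weight h; simp [pvTrip]
  | cons q rest ih =>
    intro pre trip weight hnd
    obtain ⟨k, v⟩ := q
    have hmem : ((k, v) : String × Int) ∈ (PySem.Dict.mk (pre ++ (k, v) :: rest)).items := by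
      show ((k, v) : String × Int) ∈ pre ++ (k, v) :: rest
      simp
    have hkeysnd : (PySem.Dict.mk (pre ++ (k, v) :: rest)).keys.Nodup := by
      simpa [PySem.Dict.keys_mk] using hnd
    have hget : (PySem.Dict.mk (pre ++ (k, v) :: rest)).getD k 0 = v :=
      PySem.Dict.getD_of_mem_items _ hmem hkeysnd 0
    -- k is fresh in pre and rest
    have hnd' : (pre.map (·.1) ++ k :: rest.map (·.1)).Nodup := by
      simpa using hnd
    have hkpre : ∀ p ∈ pre, p.1 ≠ k := by
      intro p hp hpk
      have hkmem : k ∈ pre.map (·.1) := by rw [← hpk]; exact List.mem_map_of_mem hp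
      exact (List.disjoint_of_nodup_append hnd') hkmem (by simp)
    have hkrest : ∀ p ∈ rest, p.1 ≠ k := by
      intro p hp hpk
      have h2 : (k :: rest.map (·.1)).Nodup := (List.nodup_append.mp hnd').2.1
      have hkmem : k ∈ rest.map (·.1) := by rw [← hpk]; exact List.mem_map_of_mem hp
      exact (List.nodup_cons.mp h2).1 hkmem
    simp only [List.map_cons, List.foldl_cons]
    by_cases hcond : weight + v ≤ limit ∧ v ≠ 0
    · have hstep : pvATripStep limit ((trip, weight), PySem.Dict.mk (pre ++ (k, v) :: rest)) k
          = ((trip ++ [k], weight + v), PySem.Dict.mk ((pre ++ [(k, 0)]) ++ rest)) := by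
        unfold pvATripStep
        rw [if_pos (by simpa [hget] using hcond)]
        simp only [hget]
        congr 1
        have hcont : (PySem.Dict.mk (pre ++ (k, v) :: rest)).contains k = true := by
          rw [PySem.Dict.contains_iff_mem_keys]
          simp [PySem.Dict.keys_mk]
        apply PySem.Dict.ext
        rw [PySem.Dict.items_insert_of_contains _ _ hcont]
        show (pre ++ (k, v) :: rest).map _ = _
        rw [List.map_append, pvMark_eq 0 pre hkpre]
        simp only [List.map_cons, beq_self_eq_true, if_pos]
        rw [pvMark_eq 0 rest hkrest]
        simp
      rw [hstep, ih (pre ++ [(k, 0)]) (trip ++ [k]) (weight + v)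
        (by simpa using hnd)]
      simp only [pvTrip]
      rw [if_pos hcond]
      simp
    · have hstep : pvATripStep limit ((trip, weight), PySem.Dict.mk (pre ++ (k, v) :: rest)) k
          = ((trip, weight), PySem.Dict.mk ((pre ++ [(k, v)]) ++ rest)) := by
        unfold pvATripStep
        rw [if_neg (by simpa [hget] using hcond)]
        simp
      rw [hstep, ih (pre ++ [(k, v)]) trip weight (by simpa using hnd)]
      simp only [pvTrip]
      rw [if_neg hcond]
      simp

lemma pvTrip_fst (limit : Int) : ∀ (L : List (String × Int)) (w : Int),
    (pvTrip limit L w).2.map (·.1) = L.map (·.1) := by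
  intro L
  induction L with
  | nil => intro w; simp [pvTrip]
  | cons q rest ih =>
    intro w
    obtain ⟨k, v⟩ := q
    simp only [pvTrip]
    split
    · simp [ih]
    · simp [ih]

-- A's while loop on a dict is pvMLoop on its item list.
lemma pvALoop_eq_mLoop (limit : Int) : ∀ (fuel : Nat) (L : List (String × Int)),
    (L.map (·.1)).Nodup → pvALoop limit fuel (PySem.Dict.mk L) = pvMLoop limit fuel L := by
  intro fuel
  induction fuel with
  | zero => intro L h; rfl
  | succ fuel ih =>
    intro L hnd
    show pvALoop limit (fuel+1) (PySem.Dict.mk L) = pvMLoop limit (fuel+1) L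
    simp only [pvALoop, pvMLoop]
    have hvals : (PySem.Dict.mk L).values = L.map (·.2) := by simp [PySem.Dict.values_mk]
    have hkeys : (PySem.Dict.mk L).keys = L.map (·.1) := by simp [PySem.Dict.keys_mk]
    rw [hvals, hkeys]
    split
    · have := pvATrip_sim limit L [] [] 0 (by simpa using hnd)
      simp only [List.nil_append] at this
      rw [this]
      rw [ih (pvTrip limit L 0).2 (by rw [pvTrip_fst]; exact hnd)]
    · rfl

-- B's first-fit fold, peeled one trip at a time.
lemma pvFoldl_place_cons (limit : Int) : ∀ (P : List (String × Int)) (t : List String × Int)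
    (ts : List (List String × Int)),
    P.foldl (fun acc p => pvBPlace limit p.1 p.2 acc) (t :: ts)
      = (pvFill limit t P).1 :: (pvFill limit t P).2.foldl (fun acc p => pvBPlace limit p.1 p.2 acc) ts := by
  intro P
  induction P with
  | nil => intro t ts; simp [pvFill]
  | cons q rest ih =>
    intro t ts
    obtain ⟨k, v⟩ := q
    simp only [List.foldl_cons, pvBPlace, pvFill]
    split
    · exact ih _ _
    · rw [ih t (pvBPlace limit k v ts)]
      simp [List.foldl_cons]

-- pvTrip on a zero-marked list is pvFill on the unshipped (nonzero) entries.
lemma pvTrip_fill (limit : Int) : ∀ (L : List (String × Int)) (names : List String) (w : Int),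
    pvFill limit (names, w) (L.filter (fun p => decide (p.2 ≠ 0)))
      = ((names ++ (pvTrip limit L w).1.1, (pvTrip limit L w).1.2),
         (pvTrip limit L w).2.filter (fun p => decide (p.2 ≠ 0))) := by
  intro L
  induction L with
  | nil => intro names w; simp [pvTrip, pvFill]
  | cons q rest ih =>
    intro names w
    obtain ⟨k, v⟩ := q
    by_cases hv : v = 0
    · subst hv
      rw [List.filter_cons_of_neg (by simp)]
      simp only [pvTrip]
      rw [if_neg (by simp)]
      rw [List.filter_cons_of_neg (by simp)]
      exact ih names w
    · simp only [List.filter_cons, pvTrip]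
      rw [if_pos (by simpa using hv)]
      by_cases hc : w + v ≤ limit
      · rw [if_pos ⟨hc, hv⟩]
        simp only [pvFill, hc, if_pos]
        rw [ih (names ++ [k]) (w + v)]
        simp
      · rw [if_neg (by tauto)]
        simp only [pvFill, hc, ite_false]
        rw [ih names w]
        simp [hv]

lemma pvTrip_mem (limit : Int) : ∀ (L : List (String × Int)) (w : Int) (p : String × Int),
    p ∈ (pvTrip limit L w).2 → p.2 = 0 ∨ p ∈ L := by
  intro L
  induction L with
  | nil => intro w p h; simp [pvTrip] at h
  | cons q rest ih =>
    intro w p h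
    obtain ⟨k, v⟩ := q
    simp only [pvTrip] at h
    split at h
    · simp only [List.mem_cons] at h
      rcases h with h | h
      · left; simp [h]
      · rcases ih _ _ h with h' | h'
        · exact Or.inl h'
        · exact Or.inr (List.mem_cons_of_mem _ h')
    · simp only [List.mem_cons] at h
      rcases h with h | h
      · exact Or.inr (by simp [h])
      · rcases ih _ _ h with h' | h'
        · exact Or.inl h'
        · exact Or.inr (List.mem_cons_of_mem _ h')

lemma pvFill_length (limit : Int) : ∀ (P : List (String × Int)) (t : List String × Int),
    (pvFill limit t P).2.length ≤ P.length := by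
  intro P
  induction P with
  | nil => intro t; simp [pvFill]
  | cons q rest ih =>
    intro t
    obtain ⟨k, v⟩ := q
    simp only [pvFill]
    split
    · exact le_trans (ih _) (by simp)
    · simpa using ih t

lemma pvSum_zero_iff : ∀ (L : List (String × Int)),
    (∀ p ∈ L, 0 ≤ p.2) →
    ((L.map (·.2)).sum = 0 ↔ L.filter (fun p => decide (p.2 ≠ 0)) = []) := by
  intro L hL
  rw [List.filter_eq_nil_iff]
  induction L with
  | nil => simp
  | cons q rest ih =>
    have hq : 0 ≤ q.2 := hL q (by simp)
    have hrest : ∀ p ∈ rest, 0 ≤ p.2 := fun p hp => hL p (List.mem_cons_of_mem _ hp)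
    have hsum : 0 ≤ (rest.map (·.2)).sum := by
      apply List.sum_nonneg
      intro x hx
      obtain ⟨p, hp, rfl⟩ := List.mem_map.mp hx
      exact hrest p hp
    constructor
    · intro h p hp
      simp only [List.map_cons, List.sum_cons] at h
      simp only [List.mem_cons] at hp
      rcases hp with rfl | hp
      · simpa using (by omega : p.2 = 0)
      · exact (ih hrest).mp (by omega) p hp
    · intro h
      simp only [List.map_cons, List.sum_cons]
      have hq2 : q.2 = 0 := by simpa using h q (by simp)
      have : (rest.map (·.2)).sum = 0 := (ih hrest).mpr (fun p hp => h p (List.mem_cons_of_mem _ hp))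
      omega

lemma pvFilter_nil_sum : ∀ (L : List (String × Int)),
    L.filter (fun p => decide (p.2 ≠ 0)) = [] → (L.map (·.2)).sum = 0 := by
  intro L
  induction L with
  | nil => intro _; simp
  | cons q rest ih =>
    intro h
    rw [List.filter_eq_nil_iff] at h
    have hq : q.2 = 0 := by simpa using h q (by simp)
    have hrest := ih (List.filter_eq_nil_iff.mpr (fun p hp => h p (List.mem_cons_of_mem _ hp)))
    simp only [List.map_cons, List.sum_cons]
    omega

-- Every negative cow is taken into the trip being filled (its weight always fits),
-- so the cows a trip leaves behind all have nonnegative weight.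
lemma pvTrip_rest_nonneg (limit : Int) : ∀ (L : List (String × Int)) (w : Int), w ≤ limit →
    ∀ p ∈ (pvTrip limit L w).2, 0 ≤ p.2 := by
  intro L
  induction L with
  | nil => intro w hw p hp; simp [pvTrip] at hp
  | cons q rest ih =>
    intro w hw p hp
    obtain ⟨k, v⟩ := q
    simp only [pvTrip] at hp
    split at hp
    · rename_i hc
      simp only [List.mem_cons] at hp
      rcases hp with rfl | hp
      · simp
      · exact ih (w + v) hc.1 p hp
    · rename_i hc
      simp only [List.mem_cons] at hp
      rcases hp with rfl | hp
      · by_cases hv : v = 0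
        · simp [hv]
        · have hgt : ¬ (w + v ≤ limit) := fun hle => hc ⟨hle, hv⟩
          show 0 ≤ v
          omega
      · exact ih w hw p hp

-- The heart: A's trip-at-a-time loop equals B's one-pass first-fit fold.
lemma pvMLoop_eq_ffd (limit : Int) (hlim : 0 ≤ limit) : ∀ (fuel : Nat) (L : List (String × Int)),
    (∀ p ∈ L, p.2 ≤ limit) →
    ((L.map (·.2)).sum = 0 → L.filter (fun p => decide (p.2 ≠ 0)) = []) →
    (L.filter (fun p => decide (p.2 ≠ 0))).length < fuel →
    pvMLoop limit fuel L
      = ((L.filter (fun p => decide (p.2 ≠ 0))).foldl (fun acc p => pvBPlace limit p.1 p.2 acc) []).map (·.1) := by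
  intro fuel
  induction fuel with
  | zero => intro L h hz hlen; omega
  | succ fuel ih =>
    intro L hL hz hlen
    show pvMLoop limit (fuel+1) L = _
    simp only [pvMLoop]
    by_cases hsum : (L.map (·.2)).sum = 0
    · rw [if_neg (by simpa using hsum)]
      rw [hz hsum]
      rfl
    · rw [if_pos hsum]
      obtain ⟨q, F', hfil⟩ : ∃ q F', L.filter (fun p => decide (p.2 ≠ 0)) = q :: F' := by
        rcases h : L.filter (fun p => decide (p.2 ≠ 0)) with _ | ⟨q, F'⟩
        · exact absurd (pvFilter_nil_sum L h) hsum
        · exact ⟨q, F', h⟩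
      have hqmemL : q ∈ L := List.mem_of_mem_filter (by rw [hfil]; simp)
      have hqle : q.2 ≤ limit := hL q hqmemL
      have h0 := pvTrip_fill limit L [] 0
      have hfill0 : pvFill limit ([], 0) (q :: F') = pvFill limit ([q.1], q.2) F' := by
        obtain ⟨k, v⟩ := q
        simp only [pvFill]
        rw [if_pos (by simp only at hqle; omega)]
        norm_num
      have hfq : pvFill limit ([q.1], q.2) F'
          = (((pvTrip limit L 0).1.1, (pvTrip limit L 0).1.2),
             (pvTrip limit L 0).2.filter (fun p => decide (p.2 ≠ 0))) := by
        rw [← hfill0, ← hfil, h0]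
        simp
      rw [hfil]
      have hBside : (q :: F').foldl (fun acc p => pvBPlace limit p.1 p.2 acc) []
          = (pvFill limit ([q.1], q.2) F').1
            :: (pvFill limit ([q.1], q.2) F').2.foldl (fun acc p => pvBPlace limit p.1 p.2 acc) [] := by
        rw [List.foldl_cons]
        show List.foldl _ [([q.1], q.2)] F' = _
        exact pvFoldl_place_cons limit F' ([q.1], q.2) []
      rw [hBside, hfq]
      simp only [List.map_cons]
      congr 1
      have hrest_nonneg : ∀ p ∈ (pvTrip limit L 0).2, 0 ≤ p.2 :=
        pvTrip_rest_nonneg limit L 0 hlim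
      apply ih
      · intro p hp
        rcases pvTrip_mem limit L 0 p hp with h | h
        · omega
        · exact hL p h
      · intro hs
        exact (pvSum_zero_iff _ hrest_nonneg).mp hs
      · have hlen' : F'.length < fuel := by
          have : (q :: F').length < fuel + 1 := by rw [← hfil]; exact hlen
          simpa using this
        calc ((pvTrip limit L 0).2.filter (fun p => decide (p.2 ≠ 0))).length
            = (pvFill limit ([q.1], q.2) F').2.length := by rw [hfq]
          _ ≤ F'.length := pvFill_length limit F' _
          _ < fuel := hlen'

lemma pvSize_foldl_insert : ∀ (l : List (String × Int)) (d : PySem.Dict String Int),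
    (l.foldl (fun d p => d.insert p.1 p.2) d).items.length ≤ d.items.length + l.length := by
  intro l
  induction l with
  | nil => intro d; simp
  | cons p rest ih =>
    intro d
    simp only [List.foldl_cons, List.length_cons]
    calc (rest.foldl (fun d p => d.insert p.1 p.2) (d.insert p.1 p.2)).items.length
        ≤ (d.insert p.1 p.2).items.length + rest.length := ih _
      _ ≤ d.items.length + (rest.length + 1) := by
          have := PySem.Dict.size_insert d p.1 p.2
          show (d.insert p.1 p.2).size + rest.length ≤ d.size + (rest.length + 1)
          rw [this]
          split <;> omega

lemma pvItems_ofList_le (cows : List (String × Int)) :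
    (PySem.Dict.ofList cows).items.length ≤ cows.length := by
  have := pvSize_foldl_insert cows PySem.Dict.empty
  show (cows.foldl (fun d p => d.insert p.1 p.2) PySem.Dict.empty).items.length ≤ cows.length
  simpa [show (PySem.Dict.empty : PySem.Dict String Int).items = [] from rfl] using this

-- B's fold skips zero-weight cows: it equals the first-fit fold over the nonzero entries.
lemma pvFoldl_skip (limit : Int) : ∀ (l : List (String × Int)) (init : List (List String × Int)),
    l.foldl (fun ts p => if p.2 = 0 then ts else pvBPlace limit p.1 p.2 ts) init
      = (l.filter (fun p => decide (p.2 ≠ 0))).foldl (fun acc p => pvBPlace limit p.1 p.2 acc) init := by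
  intro l
  induction l with
  | nil => intro init; rfl
  | cons q rest ih =>
    intro init
    by_cases hq : q.2 = 0
    · rw [List.filter_cons_of_neg (by simpa using hq)]
      simp only [List.foldl_cons, if_pos hq]
      exact ih init
    · rw [List.filter_cons_of_pos (by simpa using hq)]
      simp only [List.foldl_cons, if_neg hq]
      exact ih _

lemma pvBPlace_ne_nil (limit : Int) (name : String) (w : Int) :
    ∀ (ts : List (List String × Int)), pvBPlace limit name w ts ≠ [] := by
  intro ts
  cases ts with
  | nil => simp [pvBPlace]
  | cons t ts =>
    simp only [pvBPlace]
    split <;> simp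

lemma pvSkipFold_ne_nil (limit : Int) : ∀ (l : List (String × Int)) (init : List (List String × Int)),
    (init ≠ [] ∨ ∃ p ∈ l, p.2 ≠ 0) →
    l.foldl (fun ts p => if p.2 = 0 then ts else pvBPlace limit p.1 p.2 ts) init ≠ [] := by
  intro l
  induction l with
  | nil =>
    intro init h
    rcases h with h | h
    · simpa using h
    · simp at h
  | cons q rest ih =>
    intro init h
    simp only [List.foldl_cons]
    by_cases hq : q.2 = 0
    · rw [if_pos hq]
      apply ih
      rcases h with h | h
      · exact Or.inl h
      · obtain ⟨p, hp, hpne⟩ := h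
        simp only [List.mem_cons] at hp
        rcases hp with rfl | hp
        · exact absurd hq hpne
        · exact Or.inr ⟨p, hp, hpne⟩
    · rw [if_neg hq]
      exact ih _ (Or.inl (pvBPlace_ne_nil limit q.1 q.2 init))

-- ===== VERDICT (by name: the statement is the Claim_ definition above) =====
theorem greedy_cow_transport_spec : Claim_unchanged_greedy_cow_transport := by
  intro cows limit _hDom hPre hnD
  obtain ⟨hlim, hPre⟩ := hPre
  set d := PySem.Dict.ofList cows with hd
  set K := PySem.List.sorted d.keys (fun j => d.getD j 0) true with hK
  set Q := K.map (fun k => (k, d.getD k 0)) with hQ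
  have hnDs : ¬ ((∃ p ∈ d.items, p.2 ≠ 0) ∧ (d.items.map (·.2)).sum = 0) := hnD
  have hA : greedy_cow_transport cows limit
      = pvALoop limit (cows.length + 1)
          (K.foldl (fun nc j => if d.contains j then nc.insert j (d.getD j 0) else nc) PySem.Dict.empty) := rfl
  have hB : greedy_cow_transport_alt cows limit
      = (K.foldl (fun ts name =>
          if d.getD name 0 = 0 then ts else pvBPlace limit name (d.getD name 0) ts) []).map (·.1) := rfl
  have hKnd : K.Nodup := by
    exact (PySem.List.sorted_perm d.keys (fun j => d.getD j 0) true).symm.nodup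
      (PySem.Dict.nodup_keys_ofList cows)
  have hKsub : ∀ k ∈ K, k ∈ d.keys := fun k hk => (PySem.List.mem_sorted _ _ _ _).mp hk
  -- the rebuilt dict has item list Q
  have hnew : K.foldl (fun nc j => if d.contains j then nc.insert j (d.getD j 0) else nc) PySem.Dict.empty
      = PySem.Dict.mk Q := by
    rw [PySem.List.foldl_congr_mem K _ (fun nc j => nc.insert j (d.getD j 0)) _ (by
      intro acc j hj
      rw [if_pos ((PySem.Dict.contains_iff_mem_keys d j).mpr (hKsub j hj))])]
    apply PySem.Dict.ext
    rw [PySem.Dict.items_foldl_insert_fresh K (fun j => j) (fun j => d.getD j 0) PySem.Dict.empty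
      (by intro a _; simp [PySem.Dict.contains_empty]) (by simpa using hKnd)]
    simp [hQ]
    rfl
  -- keys mapped back to their (key, value) pairs give exactly the item list
  have hmapg : d.keys.map (fun k => (k, d.getD k 0)) = d.items := by
    have h1 : d.items.map (fun p => (p.1, d.getD p.1 0)) = d.items := by
      conv_rhs => rw [← List.map_id d.items]
      apply List.map_congr_left
      intro p hp
      obtain ⟨k, v⟩ := p
      have := PySem.Dict.getD_of_mem_items d hp (PySem.Dict.nodup_keys_ofList cows) 0
      simp [this]
    calc d.keys.map (fun k => (k, d.getD k 0))
        = d.items.map (fun p => (p.1, d.getD p.1 0)) := by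
          show (d.items.map (·.1)).map _ = _
          rw [List.map_map]
          rfl
      _ = d.items := h1
  have hQperm : Q.Perm d.items := by
    rw [hQ, ← hmapg]
    exact (PySem.List.sorted_perm d.keys (fun j => d.getD j 0) true).map _
  -- every cow in Q has weight at most the limit
  have hvals : ∀ p ∈ Q, p.2 ≤ limit := fun p hp => hPre p (hQperm.subset hp)
  have hQfst : Q.map (·.1) = K := by
    rw [hQ, List.map_map]
    exact List.map_id K
  -- outside D_, the weights cannot sum to zero unless every weight is zero (A's early exit)
  have hQsum : (Q.map (·.2)).sum = 0 → Q.filter (fun p => decide (p.2 ≠ 0)) = [] := by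
    intro hs
    rw [List.filter_eq_nil_iff]
    intro p hp hpz
    exact hnDs ⟨⟨p, hQperm.subset hp, by simpa using hpz⟩,
      by rw [← (hQperm.map (·.2)).sum_eq]; exact hs⟩
  have hQlen : (Q.filter (fun p => decide (p.2 ≠ 0))).length < cows.length + 1 := by
    have h1 : Q.length = K.length := by simp [hQ]
    have h2 : K.length = d.keys.length := PySem.List.length_sorted _ _ _
    have h3 : d.keys.length = d.items.length := by simp [PySem.Dict.keys]
    have h4 : d.items.length ≤ cows.length := pvItems_ofList_le cows
    have h5 : (Q.filter (fun p => decide (p.2 ≠ 0))).length ≤ Q.length := List.length_filter_le _ _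
    omega
  show greedy_cow_transport cows limit = greedy_cow_transport_alt cows limit
  rw [hA, hB, hnew, pvALoop_eq_mLoop limit (cows.length + 1) Q (by rw [hQfst]; exact hKnd)]
  rw [pvMLoop_eq_ffd limit hlim (cows.length + 1) Q hvals hQsum hQlen]
  have hBfold : K.foldl (fun ts name =>
        if d.getD name 0 = 0 then ts else pvBPlace limit name (d.getD name 0) ts) []
      = Q.foldl (fun ts p => if p.2 = 0 then ts else pvBPlace limit p.1 p.2 ts) [] := by
    rw [hQ, List.foldl_map]
  rw [hBfold, pvFoldl_skip limit Q []]

theorem greedy_cow_transport_changed : Claim_changed_greedy_cow_transport := by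
  unfold Claim_changed_greedy_cow_transport; decide

theorem greedy_cow_transport_tight : Claim_exact_greedy_cow_transport := by
  intro cows limit _hDom hPre hD
  obtain ⟨hlim, hPre⟩ := hPre
  obtain ⟨⟨p0, hp0, hp0ne⟩, hsum0⟩ := hD
  set d := PySem.Dict.ofList cows with hd
  set K := PySem.List.sorted d.keys (fun j => d.getD j 0) true with hK
  set Q := K.map (fun k => (k, d.getD k 0)) with hQ
  have hKnd : K.Nodup := by
    exact (PySem.List.sorted_perm d.keys (fun j => d.getD j 0) true).symm.nodup
      (PySem.Dict.nodup_keys_ofList cows)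
  have hKsub : ∀ k ∈ K, k ∈ d.keys := fun k hk => (PySem.List.mem_sorted _ _ _ _).mp hk
  have hnew : K.foldl (fun nc j => if d.contains j then nc.insert j (d.getD j 0) else nc) PySem.Dict.empty
      = PySem.Dict.mk Q := by
    rw [PySem.List.foldl_congr_mem K _ (fun nc j => nc.insert j (d.getD j 0)) _ (by
      intro acc j hj
      rw [if_pos ((PySem.Dict.contains_iff_mem_keys d j).mpr (hKsub j hj))])]
    apply PySem.Dict.ext
    rw [PySem.Dict.items_foldl_insert_fresh K (fun j => j) (fun j => d.getD j 0) PySem.Dict.empty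
      (by intro a _; simp [PySem.Dict.contains_empty]) (by simpa using hKnd)]
    simp [hQ]
    rfl
  have hmapg : d.keys.map (fun k => (k, d.getD k 0)) = d.items := by
    have h1 : d.items.map (fun p => (p.1, d.getD p.1 0)) = d.items := by
      conv_rhs => rw [← List.map_id d.items]
      apply List.map_congr_left
      intro p hp
      obtain ⟨k, v⟩ := p
      have := PySem.Dict.getD_of_mem_items d hp (PySem.Dict.nodup_keys_ofList cows) 0
      simp [this]
    calc d.keys.map (fun k => (k, d.getD k 0))
        = d.items.map (fun p => (p.1, d.getD p.1 0)) := by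
          show (d.items.map (·.1)).map _ = _
          rw [List.map_map]
          rfl
      _ = d.items := h1
  have hQperm : Q.Perm d.items := by
    rw [hQ, ← hmapg]
    exact (PySem.List.sorted_perm d.keys (fun j => d.getD j 0) true).map _
  have hQsum0 : (Q.map (·.2)).sum = 0 := by
    rw [(hQperm.map (·.2)).sum_eq]
    exact hsum0
  -- A exits its while loop immediately: the total weight is already zero
  have hAnil : greedy_cow_transport cows limit = [] := by
    rw [show greedy_cow_transport cows limit
        = pvALoop limit (cows.length + 1)
            (K.foldl (fun nc j => if d.contains j then nc.insert j (d.getD j 0) else nc)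
              PySem.Dict.empty) from rfl, hnew]
    show pvALoop limit (cows.length + 1) (PySem.Dict.mk Q) = []
    simp only [pvALoop]
    rw [if_neg (by
      have hv : (PySem.Dict.mk Q).values = Q.map (·.2) := by simp [PySem.Dict.values_mk]
      rw [hv]
      simpa using hQsum0)]
  -- B ships the nonzero-weight cows: its trip list is nonempty
  have hBfold : greedy_cow_transport_alt cows limit
      = (Q.foldl (fun ts p => if p.2 = 0 then ts else pvBPlace limit p.1 p.2 ts) []).map (·.1) := by
    rw [show greedy_cow_transport_alt cows limit
        = (K.foldl (fun ts name =>
            if d.getD name 0 = 0 then ts else pvBPlace limit name (d.getD name 0) ts) []).map (·.1) from rfl]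
    rw [hQ, List.foldl_map]
  have hBne : greedy_cow_transport_alt cows limit ≠ [] := by
    rw [hBfold]
    intro hmapnil
    rw [List.map_eq_nil_iff] at hmapnil
    exact pvSkipFold_ne_nil limit Q [] (Or.inr ⟨p0, hQperm.mem_iff.mpr hp0, hp0ne⟩) hmapnil
  rw [hAnil]
  exact fun h => hBne h.symm
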